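-- pv_equiv track=rewrite | github.com/ashwilliams7-code/SeekMateAI | longform/ai_responder.py | _find_closest_option
-- ===== SOURCE A (Python) =====
-- def _find_closest_option(answer, options):
--     """Find the option that best matches the GPT answer."""
--     answer_lower = answer.lower().strip()
--
--     # Exact match
--     for opt in options:
--         if opt.lower().strip() == answer_lower:
--             return opt
--
--     # Substring match
--     for opt in options:
--         if answer_lower in opt.lower() or opt.lower() in answer_lower:
--             return opt
--
--     # Word overlap scoring
--     answer_words = set(answer_lower.split())
--     best_score = 0
--     best_opt = None
--     for opt in options:
--         opt_words = set(opt.lower().split())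
--         overlap = len(answer_words & opt_words)
--         if overlap > best_score:
--             best_score = overlap
--             best_opt = opt
--
--     return best_opt
-- ===== SOURCE B (Python) =====
-- def _find_closest_option(answer, options):
--     """Single pass with a best-so-far composite (tier, score) priority key."""
--     ans = answer.lower().strip()
--     ans_words = set(ans.split())
--     best_key = (0, 0)
--     best_opt = None
--     for opt in options:
--         low = opt.lower()
--         if low.strip() == ans:
--             key = (3, 0)
--         elif ans in low or low in ans:
--             key = (2, 0)
--         else:
--             ov = len(ans_words & set(low.split()))
--             key = (1, ov) if ov > 0 else (0, 0)
--         if key > best_key: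
--             best_key = key
--             best_opt = opt
--     return best_opt
-- ===== Notes on version B (the rewrite author's own statement) =====
-- stated objective: alternative
-- what changed: Replaces A's three sequential passes (exact loop, substring loop, overlap-scoring loop) with one fold over the options maintaining a best-so-far lexicographic (tier, score) priority key with first-index tie-breaking.
import Mathlib
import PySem

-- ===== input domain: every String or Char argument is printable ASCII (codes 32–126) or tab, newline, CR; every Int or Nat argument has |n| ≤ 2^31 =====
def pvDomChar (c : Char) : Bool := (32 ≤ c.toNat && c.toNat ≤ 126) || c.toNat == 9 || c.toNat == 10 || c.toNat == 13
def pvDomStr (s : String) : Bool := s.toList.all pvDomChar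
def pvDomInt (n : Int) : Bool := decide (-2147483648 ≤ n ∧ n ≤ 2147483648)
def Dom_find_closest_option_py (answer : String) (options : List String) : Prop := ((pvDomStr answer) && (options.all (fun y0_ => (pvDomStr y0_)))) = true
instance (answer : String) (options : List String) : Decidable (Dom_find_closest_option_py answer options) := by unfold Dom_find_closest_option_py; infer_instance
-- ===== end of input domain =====

-- B replaces A's three sequential passes by a single fold with a best-so-far
-- (tier, score) priority key (objective: alternative decomposition, same cost).

-- ===== PORT A =====
-- loop body of A's third pass (word-overlap scoring)
def pvA_step (aw : PySem.Set String) (st : Int × Option String) (opt : String) :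
    Int × Option String :=
  let opt_words := PySem.Set.ofList (PySem.Str.split₀ (PySem.Str.lower opt))
  let overlap := PySem.Set.len (PySem.Set.inter aw opt_words)
  if st.1 < overlap then (overlap, some opt) else st

def find_closest_option_py (answer : String) (options : List String) : Option String :=
  let answer_lower := PySem.Str.strip (PySem.Str.lower answer)
  -- Exact match
  match options.find? (fun opt => PySem.Str.strip (PySem.Str.lower opt) == answer_lower) with
  | some opt => some opt
  | none =>
    -- Substring match
    match options.find? (fun opt =>
        PySem.Str.isIn answer_lower (PySem.Str.lower opt) ||
        PySem.Str.isIn (PySem.Str.lower opt) answer_lower) with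
    | some opt => some opt
    | none =>
      -- Word overlap scoring
      let answer_words := PySem.Set.ofList (PySem.Str.split₀ answer_lower)
      (options.foldl (pvA_step answer_words) (0, none)).2

-- ===== PORT B =====
-- Python tuple comparison 'key > best_key' on int pairs is 'keyLt best_key key'
def keyLt (a b : Int × Int) : Bool := a.1 < b.1 || (a.1 == b.1 && a.2 < b.2)

-- the composite (tier, score) key of one option
def pvB_key (ans : String) (aw : PySem.Set String) (opt : String) : Int × Int :=
  let low := PySem.Str.lower opt
  if PySem.Str.strip low == ans then (3, 0)
  else if PySem.Str.isIn ans low || PySem.Str.isIn low ans then (2, 0)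
  else
    let ov := PySem.Set.len (PySem.Set.inter aw (PySem.Set.ofList (PySem.Str.split₀ low)))
    if 0 < ov then (1, ov) else (0, 0)

-- loop body of B's single pass
def pvB_step (ans : String) (aw : PySem.Set String)
    (st : (Int × Int) × Option String) (opt : String) : (Int × Int) × Option String :=
  if keyLt st.1 (pvB_key ans aw opt) then (pvB_key ans aw opt, some opt) else st

def find_closest_option_py_alt (answer : String) (options : List String) : Option String :=
  let ans := PySem.Str.strip (PySem.Str.lower answer)
  let ans_words := PySem.Set.ofList (PySem.Str.split₀ ans)
  (options.foldl (pvB_step ans ans_words) (((0, 0) : Int × Int), none)).2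

-- ===== PRECONDITION & SPEC =====
def Spec_find_closest_option_py (answer : String) (options : List String) (out : Option String) : Prop := out = find_closest_option_py_alt answer options
instance (answer : String) (options : List String) (out : Option String) : Decidable (Spec_find_closest_option_py answer options out) := by unfold Spec_find_closest_option_py; infer_instance

-- ===== CLAIM (what is proved, stated in full; the proofs are below) =====
def Claim_equal_find_closest_option_py : Prop := ∀ (answer : String) (options : List String), Dom_find_closest_option_py answer options → Spec_find_closest_option_py answer options (find_closest_option_py answer options)

-- ===== LEMMAS AND PROOFS =====

-- A's three predicates, named for the proofs
def pvC3 (al : String) (x : String) : Bool := PySem.Str.strip (PySem.Str.lower x) == al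
def pvC2 (al : String) (x : String) : Bool :=
  PySem.Str.isIn al (PySem.Str.lower x) || PySem.Str.isIn (PySem.Str.lower x) al
def pvW (aw : PySem.Set String) (x : String) : Int :=
  PySem.Set.len (PySem.Set.inter aw (PySem.Set.ofList (PySem.Str.split₀ (PySem.Str.lower x))))

lemma pvB_key_eq (al : String) (aw : PySem.Set String) (x : String) :
    pvB_key al aw x =
      if pvC3 al x then (3, 0)
      else if pvC2 al x then (2, 0)
      else if 0 < pvW aw x then (1, pvW aw x) else (0, 0) := rfl

lemma key_of_c3 {al : String} {aw : PySem.Set String} {x : String} (h : pvC3 al x = true) :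
    pvB_key al aw x = (3, 0) := by
  rw [pvB_key_eq, if_pos h]

lemma keyLt_three (al : String) (aw : PySem.Set String) (x : String) :
    keyLt (3, 0) (pvB_key al aw x) = false := by
  rw [pvB_key_eq]
  split_ifs <;> simp_all [keyLt]

lemma keyLt_lt_three {al : String} {aw : PySem.Set String} {x : String}
    (h : pvC3 al x = false) : keyLt (pvB_key al aw x) (3, 0) = true := by
  rw [pvB_key_eq, h]
  split_ifs <;> simp_all [keyLt]

lemma keyLt_two {al : String} {aw : PySem.Set String} {x : String}
    (h : pvC3 al x = false) : keyLt (2, 0) (pvB_key al aw x) = false := by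
  rw [pvB_key_eq, h]
  split_ifs <;> simp_all [keyLt]

lemma keyLt_lt_two {al : String} {aw : PySem.Set String} {x : String}
    (h3 : pvC3 al x = false) (h2 : pvC2 al x = false) :
    keyLt (pvB_key al aw x) (2, 0) = true := by
  rw [pvB_key_eq, h3, h2]
  split_ifs <;> simp_all [keyLt]

-- the fold never moves off a state no remaining key beats
lemma foldB_max (al : String) (aw : PySem.Set String) :
    ∀ (l : List String) (k : Int × Int) (o : Option String),
      (∀ x ∈ l, keyLt k (pvB_key al aw x) = false) →
      l.foldl (pvB_step al aw) (k, o) = (k, o) := by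
  intro l
  induction l with
  | nil => intro k o _; rfl
  | cons x l ih =>
    intro k o h
    have hx := h x (List.mem_cons_self ..)
    simp only [List.foldl_cons, pvB_step, hx, Bool.false_eq_true, if_false]
    exact ih k o (fun y hy => h y (List.mem_cons_of_mem _ hy))

-- if A's exact-match pass finds opt, B's fold (from any state below (3,0)) ends on opt
lemma foldB_of_find3 (al : String) (aw : PySem.Set String) :
    ∀ (l : List String) (k : Int × Int) (o : Option String) (opt : String),
      keyLt k (3, 0) = true →
      l.find? (pvC3 al) = some opt →
      (l.foldl (pvB_step al aw) (k, o)).2 = some opt := by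
  intro l
  induction l with
  | nil => intro k o opt _ hf; simp at hf
  | cons x l ih =>
    intro k o opt hk hf
    by_cases hx : pvC3 al x = true
    · rw [List.find?_cons_of_pos hx, Option.some_inj] at hf
      subst hf
      have hstep : pvB_step al aw (k, o) x = ((3, 0), some x) := by
        unfold pvB_step
        rw [key_of_c3 hx, hk]
        rfl
      rw [List.foldl_cons, hstep,
        foldB_max al aw l (3, 0) (some x) (fun y _ => keyLt_three al aw y)]
    · have hx' : pvC3 al x = false := by simpa using hx
      rw [List.find?_cons_of_neg (by simp [hx'])] at hf
      rw [List.foldl_cons]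
      unfold pvB_step
      split
      · exact ih _ _ opt (keyLt_lt_three hx') hf
      · exact ih _ _ opt hk hf

-- if no exact match exists and A's substring pass finds opt, B's fold ends on opt
lemma foldB_of_find2 (al : String) (aw : PySem.Set String) :
    ∀ (l : List String) (k : Int × Int) (o : Option String) (opt : String),
      (∀ x ∈ l, pvC3 al x = false) →
      keyLt k (2, 0) = true →
      l.find? (pvC2 al) = some opt →
      (l.foldl (pvB_step al aw) (k, o)).2 = some opt := by
  intro l
  induction l with
  | nil => intro k o opt _ _ hf; simp at hf
  | cons x l ih =>
    intro k o opt h3 hk hf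
    have hx3 := h3 x (List.mem_cons_self ..)
    have h3' : ∀ y ∈ l, pvC3 al y = false := fun y hy => h3 y (List.mem_cons_of_mem _ hy)
    by_cases hx : pvC2 al x = true
    · rw [List.find?_cons_of_pos hx, Option.some_inj] at hf
      subst hf
      have hkey : pvB_key al aw x = (2, 0) := by rw [pvB_key_eq, hx3, hx]; rfl
      have hstep : pvB_step al aw (k, o) x = ((2, 0), some x) := by
        unfold pvB_step
        rw [hkey, hk]
        rfl
      rw [List.foldl_cons, hstep,
        foldB_max al aw l (2, 0) (some x) (fun y hy => keyLt_two (h3' y hy))]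
    · have hx' : pvC2 al x = false := by simpa using hx
      rw [List.find?_cons_of_neg (by simp [hx'])] at hf
      rw [List.foldl_cons]
      unfold pvB_step
      split
      · exact ih _ _ opt h3' (keyLt_lt_two hx3 hx') hf
      · exact ih _ _ opt h3' hk hf

-- abstraction map from A's third-pass score to B's key
def pvPhi (s : Int) : Int × Int := if s = 0 then (0, 0) else (1, s)

-- with neither exact nor substring matches anywhere, B's fold simulates A's scoring fold
lemma foldB_of_overlap (al : String) (aw : PySem.Set String) :
    ∀ (l : List String),
      (∀ x ∈ l, pvC3 al x = false) →
      (∀ x ∈ l, pvC2 al x = false) →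
      ∀ (s : Int) (o : Option String), 0 ≤ s →
        l.foldl (pvB_step al aw) (pvPhi s, o) =
          (pvPhi (l.foldl (pvA_step aw) (s, o)).1, (l.foldl (pvA_step aw) (s, o)).2) := by
  intro l
  induction l with
  | nil => intro _ _ s o _; rfl
  | cons x l ih =>
    intro h3 h2 s o hs
    have hx3 := h3 x (List.mem_cons_self ..)
    have hx2 := h2 x (List.mem_cons_self ..)
    have h3' : ∀ y ∈ l, pvC3 al y = false := fun y hy => h3 y (List.mem_cons_of_mem _ hy)
    have h2' : ∀ y ∈ l, pvC2 al y = false := fun y hy => h2 y (List.mem_cons_of_mem _ hy)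
    have hkey : pvB_key al aw x = if 0 < pvW aw x then (1, pvW aw x) else (0, 0) := by
      rw [pvB_key_eq, hx3, hx2]; simp
    have hA : pvA_step aw (s, o) x = if s < pvW aw x then (pvW aw x, some x) else (s, o) := rfl
    rw [List.foldl_cons, List.foldl_cons, hA]
    by_cases hw : s < pvW aw x
    · have hw0 : 0 < pvW aw x := lt_of_le_of_lt hs hw
      have hlt : keyLt (pvPhi s) (pvB_key al aw x) = true := by
        rw [hkey, if_pos hw0]
        by_cases hs0 : s = 0
        · simp [pvPhi, hs0, keyLt]
        · simp [pvPhi, hs0, keyLt]; omega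
      have hstep : pvB_step al aw (pvPhi s, o) x = (pvPhi (pvW aw x), some x) := by
        rw [pvB_step, hlt, if_pos rfl, hkey, if_pos hw0, pvPhi, if_neg (by omega)]
      rw [hstep, if_pos hw, ih h3' h2' _ _ (le_of_lt hw0)]
    · have hlt : keyLt (pvPhi s) (pvB_key al aw x) = false := by
        rw [hkey]
        by_cases h0 : 0 < pvW aw x
        · have hs0 : s ≠ 0 := by omega
          rw [if_pos h0]
          simp [pvPhi, hs0, keyLt]; omega
        · rw [if_neg h0]
          by_cases hs0 : s = 0 <;> simp [pvPhi, hs0, keyLt]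
      have hstep : pvB_step al aw (pvPhi s, o) x = (pvPhi s, o) := by
        simp [pvB_step, hlt]
      rw [hstep, if_neg hw, ih h3' h2' s o hs]

-- ===== VERDICT (by name: the statement is the Claim_ definition above) =====
theorem find_closest_option_py_spec : Claim_equal_find_closest_option_py := by
  intro answer options _
  unfold Spec_find_closest_option_py find_closest_option_py find_closest_option_py_alt
  set al := PySem.Str.strip (PySem.Str.lower answer) with hal
  set aw := PySem.Set.ofList (PySem.Str.split₀ al) with haw
  show (match options.find? (pvC3 al) with
    | some opt => some opt
    | none =>
      match options.find? (pvC2 al) with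
      | some opt => some opt
      | none => (options.foldl (pvA_step aw) (0, none)).2) =
    (options.foldl (pvB_step al aw) (((0, 0) : Int × Int), none)).2
  rcases hf3 : options.find? (pvC3 al) with _ | opt
  · rcases hf2 : options.find? (pvC2 al) with _ | opt
    · have h3 : ∀ x ∈ options, pvC3 al x = false := by
        intro x hx; simpa using List.find?_eq_none.mp hf3 x hx
      have h2 : ∀ x ∈ options, pvC2 al x = false := by
        intro x hx; simpa using List.find?_eq_none.mp hf2 x hx
      have h := foldB_of_overlap al aw options h3 h2 0 none (by omega)
      rw [show pvPhi 0 = ((0, 0) : Int × Int) from rfl] at h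
      rw [h]
    · exact (foldB_of_find2 al aw options ((0, 0)) none opt
        (fun x hx => by simpa using List.find?_eq_none.mp hf3 x hx)
        (by decide) hf2).symm
  · exact (foldB_of_find3 al aw options ((0, 0)) none opt (by decide) hf3).symm
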